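-- pv_equiv track=rewrite | github.com/JwahoonKim/PS | 백준/1065.py | isSequence
-- ===== SOURCE A (Python) =====
-- def isSequence(n):
--     number = str(n)
--     length = len(number)
--     if length == 1:
--         return True
--     d = int(number[0]) - int(number[1])
--     for i in range(length - 1):
--         if int(number[i]) - int(number[i + 1]) != d:
--             return False
--     return True
-- ===== SOURCE B (Python) =====
-- def isSequence(n):
--     digits = [int(c) for c in str(n)]
--     if len(digits) == 1:
--         return True
--     d = digits[0] - digits[1]
--     return digits == [digits[0] - i * d for i in range(len(digits))]
-- ===== Notes on version B (the rewrite author's own statement) =====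
-- stated objective: alternative
-- what changed: Instead of scanning consecutive digit pairs and early-exiting when a difference disagrees with the first one, B extrapolates the whole expected digit list in closed form from the first digit and the first difference (digits[0] - i*d) and compares it to the actual digit list by a single list equality.
import Mathlib
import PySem

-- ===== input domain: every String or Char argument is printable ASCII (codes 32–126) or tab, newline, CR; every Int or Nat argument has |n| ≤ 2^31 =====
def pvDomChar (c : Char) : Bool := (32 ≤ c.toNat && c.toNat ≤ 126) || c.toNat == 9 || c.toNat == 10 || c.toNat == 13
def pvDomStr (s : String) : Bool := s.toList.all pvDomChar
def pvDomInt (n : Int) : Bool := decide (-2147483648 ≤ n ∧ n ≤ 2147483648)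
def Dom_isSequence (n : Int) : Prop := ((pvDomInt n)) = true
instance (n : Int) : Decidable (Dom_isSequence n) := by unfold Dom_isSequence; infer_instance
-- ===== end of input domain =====

-- B replaces A's scan of consecutive differences (early exit on mismatch with the first
-- difference) by building, in closed form, the digit list an arithmetic sequence starting
-- from the first digit with step d would have, and comparing it to the actual digit list.

-- ===== PORT A =====
-- int of a one-character substring; exact wherever Python's int(number[i]) returns
-- (on Pre_ every character is a digit); the .getD 0 default is only reached where Python raises.
def pvDigA (number : List Char) (i : Nat) : Int :=
  (PySem.Int.ofChars? [number.getD i ' ']).getD 0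

-- the 'for i in range(length - 1)' loop with its early 'return False'
def pvCheckA (number : List Char) (d : Int) : List Nat → Bool
  | [] => true
  | i :: rest =>
      if pvDigA number i - pvDigA number (i + 1) ≠ d then false
      else pvCheckA number d rest

def isSequence (n : Int) : Bool :=
  let number := PySem.Int.toChars n
  let length := number.length
  if length = 1 then true
  else
    let d := pvDigA number 0 - pvDigA number 1
    pvCheckA number d (List.range (length - 1))

-- ===== PORT B =====
-- digits[0]/digits[1] are only read when len(digits) ≠ 1 (str(n) is never empty for the
-- admitted n), so the .getD default is never reached on Pre_.
def isSequence_alt (n : Int) : Bool :=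
  let digits := (PySem.Int.toChars n).map (fun c => (PySem.Int.ofChars? [c]).getD 0)
  if digits.length = 1 then true
  else
    let d := digits.getD 0 0 - digits.getD 1 0
    digits == (List.range digits.length).map (fun (i : Nat) => digits.getD 0 0 - (i : Int) * d)

-- ===== PRECONDITION & SPEC =====
-- A raises ValueError on negative n (int('-') on the sign character); B raises there too.
def Pre_isSequence (n : Int) : Prop := 0 ≤ n
instance (n : Int) : Decidable (Pre_isSequence n) := by unfold Pre_isSequence; infer_instance
def pvWitness_isSequence : Int := (1234)

def Spec_isSequence (n : Int) (out : Bool) : Prop := out = isSequence_alt n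
instance (n : Int) (out : Bool) : Decidable (Spec_isSequence n out) := by unfold Spec_isSequence; infer_instance

-- ===== CLAIM (what is proved, stated in full; the proofs are below) =====
def Claim_equal_isSequence : Prop := ∀ (n : Int), Dom_isSequence n → Pre_isSequence n → Spec_isSequence n (isSequence n)

-- ===== LEMMAS AND PROOFS =====

-- A's early-exit loop is the same as 'all'
lemma pvCheckA_eq_all (number : List Char) (d : Int) (L : List Nat) :
    pvCheckA number d L = L.all (fun i => pvDigA number i - pvDigA number (i + 1) == d) := by
  induction L with
  | nil => rfl
  | cons i rest ih =>
      simp only [pvCheckA, List.all_cons, ih]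
      by_cases h : pvDigA number i - pvDigA number (i + 1) = d <;> simp [h]

-- A's lazy indexed digit equals the eager digit list's getD
lemma pvDigA_eq_getD (number : List Char) (i : Nat) :
    pvDigA number i
      = (number.map (fun c => (PySem.Int.ofChars? [c]).getD 0)).getD i 0 := by
  by_cases h : i < number.length
  · simp [pvDigA, List.getD_eq_getElem?_getD, h, List.getElem_map]
  · have h1 : number.length ≤ i := Nat.le_of_not_lt h
    have h2 : (number.map (fun c => (PySem.Int.ofChars? [c]).getD 0)).length ≤ i := by
      simpa using h1
    simp [pvDigA, List.getD_eq_getElem?_getD, List.getElem?_eq_none h1,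
      List.getElem?_eq_none h2]
    decide

-- recursive form of B's extrapolated list
def extL (a d : Int) : Nat → List Int
  | 0 => []
  | k + 1 => a :: extL (a - d) d k

lemma range_map_extL (a d : Int) (k : Nat) :
    (List.range k).map (fun (i : Nat) => a - (i : Int) * d) = extL a d k := by
  induction k generalizing a with
  | zero => rfl
  | succ k ih =>
      rw [List.range_succ_eq_map, List.map_cons, List.map_map, extL, ← ih]
      congr 1
      · simp
      · apply List.map_congr_left
        intro x _
        show a - ((x + 1 : Nat) : Int) * d = (a - d) - (x : Int) * d
        push_cast; ring

-- a list equals the extrapolation iff it starts at a and all consecutive differences are d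
lemma extL_iff (ds : List Int) (a d : Int) :
    ds = extL a d ds.length ↔
      ((∀ i, i + 1 < ds.length → ds.getD i 0 - ds.getD (i + 1) 0 = d) ∧
        (ds ≠ [] → ds.getD 0 0 = a)) := by
  induction ds generalizing a with
  | nil => simp [extL]
  | cons x t ih =>
      show x :: t = a :: extL (a - d) d t.length ↔ _
      rw [List.cons.injEq, ih (a - d)]
      cases t with
      | nil =>
          constructor
          · rintro ⟨hx, -⟩; exact ⟨by intro i hi; simp at hi, fun _ => hx⟩
          · rintro ⟨-, hx⟩; exact ⟨hx (by simp), by simp⟩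
      | cons y u =>
          constructor
          · rintro ⟨hx, hdiff, hy⟩
            refine ⟨?_, fun _ => hx⟩
            intro i hi
            cases i with
            | zero =>
                have : y = a - d := hy (by simp)
                simp [hx, this]
            | succ j =>
                exact hdiff j (by simpa using hi)
          · rintro ⟨hdiff, hx⟩
            have hx0 : x = a := hx (by simp)
            have h0 : x - y = d := by
              have := hdiff 0 (by simp)
              simpa using this
            refine ⟨hx0, ?_, fun _ => by simp; omega⟩
            intro i hi
            have := hdiff (i + 1) (by simpa using hi)
            simpa using this

-- core: the two bodies agree for an arbitrary digit character list
lemma pvMain (number : List Char) :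
    (let length := number.length
     if length = 1 then true
     else
       let d := pvDigA number 0 - pvDigA number 1
       pvCheckA number d (List.range (length - 1)))
    = (let digits := number.map (fun c => (PySem.Int.ofChars? [c]).getD 0)
       if digits.length = 1 then true
       else
         let d := digits.getD 0 0 - digits.getD 1 0
         digits == (List.range digits.length).map (fun (i : Nat) => digits.getD 0 0 - (i : Int) * d)) := by
  match number with
  | [] => simp [pvCheckA]
  | [c] => simp
  | c0 :: c1 :: cs =>
      set ds := (c0 :: c1 :: cs).map (fun c => (PySem.Int.ofChars? [c]).getD 0) with hds
      have hdslen : ds.length = cs.length + 2 := by simp [hds]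
      have hlen : (c0 :: c1 :: cs).length = cs.length + 2 := by simp
      have hne : ¬ (cs.length + 2 = 1) := by omega
      have hd0 : pvDigA (c0 :: c1 :: cs) 0 = ds.getD 0 0 := pvDigA_eq_getD _ 0
      have hd1 : pvDigA (c0 :: c1 :: cs) 1 = ds.getD 1 0 := pvDigA_eq_getD _ 1
      simp only [hlen, hdslen, if_neg hne]
      set d := pvDigA (c0 :: c1 :: cs) 0 - pvDigA (c0 :: c1 :: cs) 1 with hdDef
      have hdB : ds.getD 0 0 - ds.getD 1 0 = d := by rw [hdDef, hd0, hd1]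
      rw [hdB]
      rw [pvCheckA_eq_all, Bool.eq_iff_iff]
      simp only [List.all_eq_true, List.mem_range, beq_iff_eq, beq_iff_eq]
      rw [show ((List.range (cs.length + 2)).map
            (fun (i : Nat) => ds.getD 0 0 - (i : Int) * d))
          = extL (ds.getD 0 0) d ds.length by rw [hdslen]; exact range_map_extL _ _ _]
      rw [extL_iff]
      have hdig : ∀ i, pvDigA (c0 :: c1 :: cs) i = ds.getD i 0 := fun i => pvDigA_eq_getD _ i
      constructor
      · intro h
        refine ⟨?_, fun _ => rfl⟩
        intro i hi
        have := h i (by omega)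
        rw [hdig, hdig] at this
        exact this
      · rintro ⟨h, -⟩
        intro i hi
        rw [hdig, hdig]
        exact h i (by rw [hdslen]; omega)

-- ===== VERDICT (by name: the statement is the Claim_ definition above) =====
theorem isSequence_spec : Claim_equal_isSequence := by
  intro n _ _
  show isSequence n = isSequence_alt n
  unfold isSequence isSequence_alt
  exact pvMain (PySem.Int.toChars n)
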